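-- pv_equiv track=rewrite | github.com/BapanBigData/Data-Structure-Algorithms | Dynamic Programming/More on DP/claiming_stairs.py | minimumRounds
-- ===== SOURCE A (Python) =====
-- import math
--
-- def minimumRounds(tasks: list[int]) -> int:
--
--     def solveMem(memo, n):
--         ## base cases
--         if n < 2:
--             return math.inf
--
--         if (n == 2) or (n == 3):
--             return 1
--
--         ## check if the state is already computed
--         if n in memo:
--             memo[n]
--
--         res = math.inf
--
--         if (n-2) > 0:
--             res = min(res, (1+solveMem(memo, n-2)))
--
--         if (n-3) > 0:
--             res = min(res, (1+solveMem(memo, n-3)))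
--
--         ## store the computed state
--         memo[n] = res
--
--         return memo[n]
--
--
--     def solveTab(n):
--         ## initializing the dp
--         dp = {}
--
--         ## base case
--         dp[2] = dp[3] = 1
--
--         dp[1] = math.inf
--
--         for i in range(4, n+1):
--             res = math.inf
--
--             if (i-2) > 0:
--                 res = min(res, 1 + dp[i-2])
--
--             if (i-3) > 0:
--                 res = min(res, 1 + dp[i-3])
--
--             dp[i] = res
--
--         return dp[n]
--
--     ## initializing a frequency dict for each task
--     freq_dict = {}
--     for e in tasks:
--         if e in freq_dict:
--             freq_dict[e] += 1
--         else:
--             freq_dict[e] = 1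
--
--     ## initializing the memo dict
--     memo = {}
--
--     min_rounds = 0
--     for task, cnt in freq_dict.items():
--         ## for each task calculate min rounds required to complete
--         rounds = solveTab(cnt)
--
--         if rounds == math.inf:
--             return -1
--
--         min_rounds += rounds
--
--     return min_rounds
--
-- tasks = [2,2,3,3,2,4,4,4,4,4]
--
-- min_rounds = minimumRounds(tasks)
-- ===== SOURCE B (Python) =====
-- def minimumRounds(tasks: list[int]) -> int:
--     # closed form per count: a count c>=2 needs ceil(c/3) rounds of 2 or 3; c==1 is impossible
--     counts = {}
--     for t in tasks:
--         counts[t] = counts.get(t, 0) + 1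
--     total = 0
--     for c in counts.values():
--         if c == 1:
--             return -1
--         total += (c + 2) // 3
--     return total
-- ===== Notes on version B (the rewrite author's own statement) =====
-- stated objective: faster
-- what changed: Replaces the per-count bottom-up DP table (solveTab builds dp[4..cnt]) by the closed form ceil(cnt/3) for cnt>=2 and -1 for cnt==1, so each distinct task costs O(1) instead of O(cnt).
import Mathlib
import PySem

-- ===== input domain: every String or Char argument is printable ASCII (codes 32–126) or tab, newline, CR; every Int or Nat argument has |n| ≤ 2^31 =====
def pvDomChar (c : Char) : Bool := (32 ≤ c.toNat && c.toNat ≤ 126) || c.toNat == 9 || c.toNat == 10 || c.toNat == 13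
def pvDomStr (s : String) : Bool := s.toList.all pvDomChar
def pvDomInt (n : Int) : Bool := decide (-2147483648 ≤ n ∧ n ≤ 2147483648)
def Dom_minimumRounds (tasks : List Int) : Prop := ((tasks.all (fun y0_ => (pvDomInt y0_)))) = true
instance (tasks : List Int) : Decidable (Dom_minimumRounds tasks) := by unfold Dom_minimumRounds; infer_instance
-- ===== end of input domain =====

-- B replaces A's per-count bottom-up DP table by the closed form ceil(c/3) (c>=2) / -1 (c==1); objective: faster per distinct task.


-- ===== PORT A =====
-- math.inf is modelled as `none : Option Int` (it only ever appears as the dp value for n=1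
-- and as the initial `res`); `oadd1` is `1 + x` and `omin` is `min` under that encoding.
def oadd1 : Option Int → Option Int
  | none => none
  | some x => some (x + 1)

def omin : Option Int → Option Int → Option Int
  | none, b => b
  | some x, none => some x
  | some x, some y => if y < x then some y else some x

-- one iteration of solveTab's `for i in range(4, n+1)` loop
def solveTabStep (d : PySem.Dict Int (Option Int)) (i : Int) : PySem.Dict Int (Option Int) :=
  let res : Option Int := none
  let res := if 0 < i - 2 then omin res (oadd1 (d.getD (i - 2) none)) else res
  let res := if 0 < i - 3 then omin res (oadd1 (d.getD (i - 3) none)) else res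
  d.insert i res
-- dp[i-2]/dp[i-3]/dp[n] are ported as getD with default none: on every n this function is
-- called with (n = a count, so n ≥ 1) the accessed keys are present, so the default is never read.
def solveTabA (n : Int) : Option Int :=
  let dp : PySem.Dict Int (Option Int) :=
    (((PySem.Dict.empty).insert 2 (some 1)).insert 3 (some 1)).insert 1 none
  let dp := (PySem.List.pyRange 4 (n + 1)).foldl solveTabStep dp
  dp.getD n none

-- the `for task, cnt in freq_dict.items()` loop with its early `return -1`
def goA : List (Int × Int) → Int → Int
  | [], acc => acc
  | (_, cnt) :: rest, acc =>
    match solveTabA cnt with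
    | none => -1
    | some rounds => goA rest (acc + rounds)

def minimumRounds (tasks : List Int) : Int :=
  let freq := tasks.foldl
    (fun d e => if (d.get? e).isSome then d.insert e (d.getD e 0 + 1) else d.insert e 1)
    PySem.Dict.empty
  goA freq.items 0

-- ===== PORT B =====
def goB : List Int → Int → Int
  | [], total => total
  | c :: rest, total =>
    if c == 1 then -1 else goB rest (total + PySem.Int.floordiv (c + 2) 3)

def minimumRounds_alt (tasks : List Int) : Int :=
  let counts := tasks.foldl (fun d t => d.insert t (d.getD t 0 + 1)) PySem.Dict.empty
  goB counts.values 0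

-- ===== PRECONDITION & SPEC =====
def Spec_minimumRounds (tasks : List Int) (out : Int) : Prop := out = minimumRounds_alt tasks
instance (tasks : List Int) (out : Int) : Decidable (Spec_minimumRounds tasks out) := by unfold Spec_minimumRounds; infer_instance

-- ===== CLAIM (what is proved, stated in full; the proofs are below) =====
def Claim_equal_minimumRounds : Prop := ∀ (tasks : List Int), Dom_minimumRounds tasks → Spec_minimumRounds tasks (minimumRounds tasks)

-- ===== LEMMAS AND PROOFS =====

-- A's freq loop and B's counts loop take pointwise equal steps, hence build the same dict
theorem freq_step_eq (d : PySem.Dict Int Int) (e : Int) :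
    (if (d.get? e).isSome then d.insert e (d.getD e 0 + 1) else d.insert e 1)
      = d.insert e (d.getD e 0 + 1) := by
  cases h : d.get? e with
  | none => simp [PySem.Dict.getD_eq_get?_getD, h]
  | some v => simp

theorem freq_eq (tasks : List Int) :
    tasks.foldl
      (fun d e => if (d.get? e).isSome then d.insert e (d.getD e 0 + 1) else d.insert e 1)
      PySem.Dict.empty
      = PySem.Dict.counter tasks := by
  rw [← PySem.Dict.foldl_insert_getD_add_one_eq_counter]
  have hstep : (fun (d : PySem.Dict Int Int) (e : Int) =>
      if (d.get? e).isSome then d.insert e (d.getD e 0 + 1) else d.insert e 1)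
      = fun d e => d.insert e (d.getD e 0 + 1) := by
    funext d e; exact freq_step_eq d e
  rw [hstep]

-- the dp invariant: after the loop up to m, dp[j] = (j+2)/3 for 2 ≤ j ≤ m, and dp[1] = inf
theorem dp_inv (m : Nat) (hm : 1 ≤ m) :
    (∀ j : Nat, 2 ≤ j → j ≤ m →
      ((PySem.List.pyRange 4 ((m : Int) + 1)).foldl solveTabStep
        ((((PySem.Dict.empty).insert 2 (some 1)).insert 3 (some 1)).insert 1 none)).getD (j : Int) none
        = some (((j : Int) + 2) / 3)) ∧
    ((PySem.List.pyRange 4 ((m : Int) + 1)).foldl solveTabStep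
        ((((PySem.Dict.empty).insert 2 (some 1)).insert 3 (some 1)).insert 1 none)).getD 1 none
        = none := by
  induction m with
  | zero => omega
  | succ m ih =>
    by_cases hsmall : m ≤ 2
    · interval_cases m
      · exact ⟨fun j h1 h2 => by omega, by decide⟩
      · refine ⟨fun j h1 h2 => ?_, by decide⟩
        have hj : j = 2 := by omega
        subst hj; decide
      · refine ⟨fun j h1 h2 => ?_, by decide⟩
        have hj : j = 2 ∨ j = 3 := by omega
        rcases hj with h | h <;> subst h <;> decide
    · by_cases hm3 : m = 3
      · -- m+1 = 4: everything is a closed computation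
        subst hm3
        refine ⟨fun j h1 h2 => ?_, by decide⟩
        have hj : j = 2 ∨ j = 3 ∨ j = 4 := by omega
        rcases hj with h | h | h <;> subst h <;> decide
      · -- m+1 ≥ 5: peel the last loop iteration
        have hm4 : 4 ≤ m := by omega
        obtain ⟨ih1, ih2⟩ := ih (by omega)
        have hcast : ((m + 1 : Nat) : Int) + 1 = ((m : Int) + 1) + 1 := by push_cast; ring
        have hrange : PySem.List.pyRange 4 (((m + 1 : Nat) : Int) + 1)
            = PySem.List.pyRange 4 ((m : Int) + 1) ++ [(m : Int) + 1] := by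
          rw [hcast, PySem.List.pyRange_one_succ_right (by omega)]
        rw [hrange, List.foldl_append]
        set d := (PySem.List.pyRange 4 ((m : Int) + 1)).foldl solveTabStep
          ((((PySem.Dict.empty).insert 2 (some 1)).insert 3 (some 1)).insert 1 none) with hd
        have hv2 : d.getD ((m : Int) + 1 - 2) none = some (((m : Int) + 1) / 3) := by
          have h : ((m : Int) + 1 - 2) = ((m - 1 : Nat) : Int) := by
            push_cast [Nat.cast_sub (by omega : 1 ≤ m)]; ring
          rw [h, ih1 (m - 1) (by omega) (by omega)]
          congr 1
          push_cast [Nat.cast_sub (by omega : 1 ≤ m)]; ring_nf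
        have hv3 : d.getD ((m : Int) + 1 - 3) none = some ((m : Int) / 3) := by
          have h : ((m : Int) + 1 - 3) = ((m - 2 : Nat) : Int) := by
            push_cast [Nat.cast_sub (by omega : 2 ≤ m)]; ring
          rw [h, ih1 (m - 2) (by omega) (by omega)]
          congr 1
          push_cast [Nat.cast_sub (by omega : 2 ≤ m)]; ring_nf
        have hc2 : (0 : Int) < (m : Int) + 1 - 2 := by omega
        have hc3 : (0 : Int) < (m : Int) + 1 - 3 := by omega
        have hres : solveTabStep d ((m : Int) + 1)
            = d.insert ((m : Int) + 1) (some ((((m : Int) + 1) + 2) / 3)) := by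
          simp only [solveTabStep, hv2, hv3, if_pos hc2, if_pos hc3, oadd1, omin]
          split_ifs with h
          · have he : (m : Int) / 3 + 1 = (((m : Int) + 1) + 2) / 3 := by omega
            rw [he]
          · have he : ((m : Int) + 1) / 3 + 1 = (((m : Int) + 1) + 2) / 3 := by omega
            rw [he]
        rw [List.foldl_cons, List.foldl_nil, hres]
        constructor
        · intro j h1 h2
          by_cases hj : (j : Int) = (m : Int) + 1
          · rw [hj, PySem.Dict.getD_insert_self]
          · rw [PySem.Dict.getD_insert_of_ne _ _ _ hj]
            exact ih1 j h1 (by omega)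
        · rw [PySem.Dict.getD_insert_of_ne _ _ _ (by omega : (1 : Int) ≠ (m : Int) + 1)]
          exact ih2

-- the DP equals the closed form on every count ≥ 1
theorem solveTabA_eq (c : Int) (hc : 1 ≤ c) :
    solveTabA c = if c = 1 then none else some (PySem.Int.floordiv (c + 2) 3) := by
  obtain ⟨m, rfl⟩ : ∃ m : Nat, c = (m : Int) := ⟨c.toNat, (Int.toNat_of_nonneg (by omega)).symm⟩
  have hm : 1 ≤ m := by exact_mod_cast hc
  by_cases h1 : m = 1
  · subst h1; decide
  · have hm2 : 2 ≤ m := by omega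
    obtain ⟨inv1, _⟩ := dp_inv m hm
    unfold solveTabA
    rw [if_neg (by exact_mod_cast h1)]
    rw [inv1 m hm2 le_rfl, PySem.Int.floordiv_eq_ediv_of_pos (by norm_num)]

-- every value of the counter of a list is the count of a member, hence ≥ 1
theorem counter_values_pos (tasks : List Int) :
    ∀ c ∈ (PySem.Dict.counter tasks).values, 1 ≤ c := by
  intro c hc
  simp only [PySem.Dict.values, PySem.Dict.items_counter, List.map_map, List.mem_map] at hc
  obtain ⟨k, hk, rfl⟩ := hc
  have : k ∈ tasks := (PySem.Set.mem_ofList tasks k).mp hk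
  have := List.count_pos_iff.mpr this
  simp only [Function.comp]
  exact_mod_cast this

-- the two result loops agree when every count is ≥ 1
theorem goA_eq_goB (items : List (Int × Int)) (acc : Int)
    (h : ∀ p ∈ items, 1 ≤ p.2) :
    goA items acc = goB (items.map Prod.snd) acc := by
  induction items generalizing acc with
  | nil => rfl
  | cons p rest ih =>
    obtain ⟨t, c⟩ := p
    have hc : 1 ≤ c := h (t, c) (List.mem_cons_self)
    simp only [goA, goB, List.map_cons, solveTabA_eq c hc]
    by_cases h1 : c = 1
    · subst h1; simp
    · rw [if_neg h1, if_neg (by simpa using h1)]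
      exact ih _ (fun p hp => h p (List.mem_cons_of_mem _ hp))

-- ===== VERDICT (by name: the statement is the Claim_ definition above) =====
theorem minimumRounds_spec : Claim_equal_minimumRounds := by
  intro tasks _
  unfold Spec_minimumRounds minimumRounds minimumRounds_alt
  rw [freq_eq, PySem.Dict.foldl_insert_getD_add_one_eq_counter]
  exact goA_eq_goB _ 0 (fun p hp => counter_values_pos tasks p.2
    (by simpa [PySem.Dict.values] using List.mem_map_of_mem (f := Prod.snd) hp))
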